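-- pv_equiv track=rewrite | github.com/KerimovEmil/ProjectEuler | code/pe229.py | cond_d_3
-- ===== SOURCE A (Python) =====
-- def cond_d_3(dc_prime):  # Accurate!
--     """Ignore powers of 3. 1 mod 3 primes must exist. 2 mod 3 primes must be even power."""
--     # 2 mod 3 primes must all be even powers
--     if any([x % 2 != 0 for p, x in dc_prime.items() if p % 3 == 2]):
--         return False
--     # At least one 1 mod3 prime must exist
--     if sum([x % 3 == 1 for x in dc_prime.keys()]) == 0:
--         # if at least one 1mod3 prime does not exist then the power of 2 must be even
--         if 2 in dc_prime.keys():
--             return True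
--         else:
--             return False
--     return True
-- ===== SOURCE B (Python) =====
-- def _score(p, x):
--     # 0: fatal (2 mod 3 prime with odd power); 2: witnessing (1 mod 3 prime, or the prime 2); 1: neutral
--     if p % 3 == 2 and x % 2 != 0:
--         return 0
--     if p % 3 == 1 or p == 2:
--         return 2
--     return 1
--
-- def cond_d_3(dc_prime):
--     scores = [_score(p, x) for p, x in dc_prime.items()]
--     return bool(scores) and min(scores) > 0 and max(scores) == 2
-- ===== Notes on version B (the rewrite author's own statement) =====
-- stated objective: alternative
-- what changed: Replaces A's two comprehension scans plus nested if/else with a map to a {0,1,2} score per prime (0 = 2mod3 prime with odd power, 2 = 1mod3 prime or the prime 2, 1 = neutral) and a min/max reduction: result is scores nonempty and min>0 and max==2.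
import Mathlib
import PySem

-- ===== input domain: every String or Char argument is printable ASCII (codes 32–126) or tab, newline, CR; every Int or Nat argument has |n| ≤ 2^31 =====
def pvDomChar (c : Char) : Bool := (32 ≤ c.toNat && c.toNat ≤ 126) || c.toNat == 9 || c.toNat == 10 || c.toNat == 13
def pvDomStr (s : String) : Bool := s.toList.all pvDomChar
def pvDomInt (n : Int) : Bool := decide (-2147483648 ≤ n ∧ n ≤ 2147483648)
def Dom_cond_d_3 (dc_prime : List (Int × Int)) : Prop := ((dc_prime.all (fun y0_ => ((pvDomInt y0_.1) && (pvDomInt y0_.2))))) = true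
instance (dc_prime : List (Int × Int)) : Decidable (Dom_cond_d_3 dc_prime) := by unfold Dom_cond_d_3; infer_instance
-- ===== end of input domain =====

-- B maps each (prime, power) pair to a score in {0,1,2} and decides by bool/min/max reductions
-- of the score list, instead of A's two comprehension scans with nested if/else; return values are identical.

-- ===== PORT A =====
-- literal port: first comprehension-scan (any over 2mod3 primes with odd power), then sum of indicator over keys, then nested if/else
def cond_d_3 (dc_prime : List (Int × Int)) : Bool :=
  if ((dc_prime.filter (fun pr => PySem.Int.mod pr.1 3 == 2)).map
        (fun pr => PySem.Int.mod pr.2 2 != 0)).any (fun b => b) then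
    false
  else
    if ((dc_prime.map (fun pr => if PySem.Int.mod pr.1 3 == 1 then (1 : Int) else 0)).sum == 0) then
      if dc_prime.any (fun pr => pr.1 == 2) then true else false
    else
      true

-- ===== PORT B =====
-- _score of Source B: 0 fatal, 2 witnessing, 1 neutral
def pyScore (p x : Int) : Int :=
  if PySem.Int.mod p 3 == 2 && PySem.Int.mod x 2 != 0 then 0
  else if PySem.Int.mod p 3 == 1 || p == 2 then 2
  else 1

-- Source B's body: score list, then bool(scores) and min(scores) > 0 and max(scores) == 2
def cond_d_3_alt (dc_prime : List (Int × Int)) : Bool :=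
  let scores := dc_prime.map (fun pr => pyScore pr.1 pr.2)
  !scores.isEmpty &&
    (match PySem.List.min? scores (fun y => y), PySem.List.max? scores (fun y => y) with
     | some mn, some mx => decide (0 < mn) && (mx == 2)
     | _, _ => false)

-- ===== PRECONDITION & SPEC =====
def Spec_cond_d_3 (dc_prime : List (Int × Int)) (out : Bool) : Prop := out = cond_d_3_alt dc_prime
instance (dc_prime : List (Int × Int)) (out : Bool) : Decidable (Spec_cond_d_3 dc_prime out) := by unfold Spec_cond_d_3; infer_instance

-- ===== CLAIM (what is proved, stated in full; the proofs are below) =====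
def Claim_equal_cond_d_3 : Prop := ∀ (dc_prime : List (Int × Int)), Dom_cond_d_3 dc_prime → Spec_cond_d_3 dc_prime (cond_d_3 dc_prime)

-- ===== LEMMAS AND PROOFS =====

-- A's first comprehension (filter-then-map, any) equals a single any over pairs
theorem anymap_eq (l : List (Int × Int)) :
    (((l.filter (fun pr => PySem.Int.mod pr.1 3 == 2)).map
        (fun pr => PySem.Int.mod pr.2 2 != 0)).any (fun b => b)) =
      l.any (fun pr => PySem.Int.mod pr.1 3 == 2 && PySem.Int.mod pr.2 2 != 0) := by
  induction l with
  | nil => rfl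
  | cons pr rest ih =>
      by_cases h : (PySem.Int.mod pr.1 3 == 2) = true
      · simp only [List.filter_cons, h, if_pos, List.map_cons, List.any_cons, ih,
          Bool.true_and]
      · rw [Bool.not_eq_true] at h
        simp only [List.filter_cons, h, List.any_cons, Bool.false_and, Bool.false_or,
          Bool.false_eq_true, if_false, ih]

-- the indicator sum is zero iff no 1mod3 prime occurs
theorem sum_ind_eq_zero (l : List (Int × Int)) :
    ((l.map (fun pr => if PySem.Int.mod pr.1 3 == 1 then (1 : Int) else 0)).sum == 0) =
      !(l.any (fun pr => PySem.Int.mod pr.1 3 == 1)) := by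
  induction l with
  | nil => simp
  | cons pr rest ih =>
      have hnn : 0 ≤ (rest.map (fun pr => if PySem.Int.mod pr.1 3 == 1 then (1 : Int) else 0)).sum := by
        apply List.sum_nonneg; intro x hx
        simp only [List.mem_map] at hx
        obtain ⟨a, _, rfl⟩ := hx
        split <;> norm_num
      by_cases h : (PySem.Int.mod pr.1 3 == 1) = true
      · simp only [List.map_cons, List.sum_cons, List.any_cons, h, if_pos]
        simp only [Bool.true_or, Bool.not_true]
        rw [beq_eq_false_iff_ne]
        omega
      · rw [Bool.not_eq_true] at h
        simp only [List.map_cons, List.sum_cons, List.any_cons, h,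
          Bool.false_eq_true, if_false, zero_add, ih, Bool.false_or]

theorem score_bounds (p x : Int) : 0 ≤ pyScore p x ∧ pyScore p x ≤ 2 := by
  unfold pyScore; split_ifs <;> norm_num

theorem score_pos_iff (p x : Int) :
    (0 < pyScore p x) ↔ ¬ (PySem.Int.mod p 3 = 2 ∧ PySem.Int.mod x 2 ≠ 0) := by
  unfold pyScore
  by_cases h1 : (PySem.Int.mod p 3 == 2 && PySem.Int.mod x 2 != 0) = true
  · rw [if_pos h1]
    simp only [Bool.and_eq_true, beq_iff_eq, bne_iff_ne] at h1
    exact iff_of_false (by norm_num) (fun hn => hn h1)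
  · rw [if_neg h1]
    simp only [Bool.and_eq_true, beq_iff_eq, bne_iff_ne] at h1
    refine iff_of_true ?_ h1
    split <;> norm_num

theorem score_eq_two_iff (p x : Int) :
    (pyScore p x = 2) ↔ (¬ (PySem.Int.mod p 3 = 2 ∧ PySem.Int.mod x 2 ≠ 0) ∧
      (PySem.Int.mod p 3 = 1 ∨ p = 2)) := by
  unfold pyScore
  by_cases h1 : (PySem.Int.mod p 3 == 2 && PySem.Int.mod x 2 != 0) = true
  · rw [if_pos h1]
    simp only [Bool.and_eq_true, beq_iff_eq, bne_iff_ne] at h1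
    exact iff_of_false (by norm_num) (fun h => h.1 h1)
  · rw [if_neg h1]
    simp only [Bool.and_eq_true, beq_iff_eq, bne_iff_ne] at h1
    by_cases h2 : (PySem.Int.mod p 3 == 1 || p == 2) = true
    · rw [if_pos h2]
      simp only [Bool.or_eq_true, beq_iff_eq] at h2
      exact iff_of_true rfl ⟨h1, h2⟩
    · rw [if_neg h2]
      simp only [Bool.or_eq_true, beq_iff_eq] at h2
      exact iff_of_false (by norm_num) (fun h => h2 h.2)

theorem foldl_min_pos (l : List Int) (a : Int) :
    (0 < List.foldl min a l) ↔ (0 < a ∧ ∀ y ∈ l, 0 < y) := by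
  induction l generalizing a with
  | nil => simp
  | cons b t ih =>
      simp only [List.foldl_cons, ih, lt_min_iff, List.forall_mem_cons]
      tauto

theorem foldl_max_eq_two (l : List Int) (a : Int) (hl : ∀ y ∈ l, y ≤ 2) (ha : a ≤ 2) :
    (List.foldl max a l = 2) ↔ (a = 2 ∨ ∃ y ∈ l, y = 2) := by
  induction l generalizing a with
  | nil => simp
  | cons b t ih =>
      have hb : b ≤ 2 := hl b (by simp)
      have ht : ∀ y ∈ t, y ≤ 2 := fun y hy => hl y (by simp [hy])
      have hmax : (max a b = 2) ↔ (a = 2 ∨ b = 2) := by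
        rcases le_total a b with h | h
        · rw [max_eq_right h]; omega
        · rw [max_eq_left h]; omega
      rw [List.foldl_cons, ih (max a b) ht (max_le ha hb), hmax, List.exists_mem_cons_iff]
      tauto

-- B's min/max reduction equals the boolean formula "no fatal pair, and a 1mod3 prime or the key 2 occurs"
theorem alt_eq (l : List (Int × Int)) :
    cond_d_3_alt l = (!(l.any (fun pr => PySem.Int.mod pr.1 3 == 2 && PySem.Int.mod pr.2 2 != 0)) &&
      (l.any (fun pr => PySem.Int.mod pr.1 3 == 1) || l.any (fun pr => pr.1 == 2))) := by
  cases l with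
  | nil => rfl
  | cons pr rest =>
      unfold cond_d_3_alt
      simp only [List.map_cons, List.isEmpty_cons, Bool.not_false, Bool.true_and,
        PySem.List.min?_id_cons, PySem.List.max?_id_cons]
      rw [Bool.eq_iff_iff]
      simp only [Bool.and_eq_true, decide_eq_true_eq, beq_iff_eq, Bool.not_eq_true',
        List.any_eq_false, Bool.or_eq_true, List.any_eq_true, bne_iff_ne]
      have hbound : ∀ y ∈ List.map (fun pr => pyScore pr.1 pr.2) rest, y ≤ 2 := by
        intro y hy
        obtain ⟨q, _, rfl⟩ := List.mem_map.mp hy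
        exact (score_bounds q.1 q.2).2
      rw [foldl_min_pos, foldl_max_eq_two _ _ hbound (score_bounds pr.1 pr.2).2]
      constructor
      · rintro ⟨⟨hs, hall⟩, h2⟩
        have hF : ∀ x ∈ pr :: rest, ¬ (PySem.Int.mod x.1 3 = 2 ∧ PySem.Int.mod x.2 2 ≠ 0) := by
          intro x hx
          rcases List.mem_cons.mp hx with rfl | hx'
          · exact (score_pos_iff x.1 x.2).mp hs
          · exact (score_pos_iff x.1 x.2).mp (hall _ (List.mem_map.mpr ⟨x, hx', rfl⟩))
        refine ⟨fun x hx => hF x hx, ?_⟩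
        rcases h2 with hpr | ⟨y, hy, hy2⟩
        · rcases ((score_eq_two_iff pr.1 pr.2).mp hpr).2 with h | h
          · exact Or.inl ⟨pr, List.mem_cons_self, h⟩
          · exact Or.inr ⟨pr, List.mem_cons_self, h⟩
        · obtain ⟨q, hq, rfl⟩ := List.mem_map.mp hy
          rcases ((score_eq_two_iff q.1 q.2).mp hy2).2 with h | h
          · exact Or.inl ⟨q, List.mem_cons_of_mem _ hq, h⟩
          · exact Or.inr ⟨q, List.mem_cons_of_mem _ hq, h⟩
      · rintro ⟨hF, hG⟩
        refine ⟨⟨(score_pos_iff pr.1 pr.2).mpr (hF pr List.mem_cons_self), ?_⟩, ?_⟩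
        · intro y hy
          obtain ⟨q, hq, rfl⟩ := List.mem_map.mp hy
          exact (score_pos_iff q.1 q.2).mpr (hF q (List.mem_cons_of_mem _ hq))
        · have hx : ∃ x ∈ pr :: rest, (PySem.Int.mod x.1 3 = 1 ∨ x.1 = 2) := by
            rcases hG with ⟨x, hx, h⟩ | ⟨x, hx, h⟩
            · exact ⟨x, hx, Or.inl h⟩
            · exact ⟨x, hx, Or.inr h⟩
          obtain ⟨x, hx, hgx⟩ := hx
          have h2 : pyScore x.1 x.2 = 2 := (score_eq_two_iff x.1 x.2).mpr ⟨hF x hx, hgx⟩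
          rcases List.mem_cons.mp hx with rfl | hx'
          · exact Or.inl h2
          · exact Or.inr ⟨pyScore x.1 x.2, List.mem_map.mpr ⟨x, hx', rfl⟩, h2⟩

-- ===== VERDICT (by name: the statement is the Claim_ definition above) =====
theorem cond_d_3_spec : Claim_equal_cond_d_3 := by
  intro l _
  unfold Spec_cond_d_3
  rw [alt_eq]
  unfold cond_d_3
  rw [anymap_eq, sum_ind_eq_zero]
  cases h1 : l.any (fun pr => PySem.Int.mod pr.1 3 == 2 && PySem.Int.mod pr.2 2 != 0) <;>
    cases h2 : l.any (fun pr => PySem.Int.mod pr.1 3 == 1) <;>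
      cases h3 : l.any (fun pr => pr.1 == 2) <;> simp
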